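-- pv_equiv track=rewrite | github.com/equal1928/search_eco | django_project/django_project/Crawler/views.py | redraw_table
-- ===== SOURCE A (Python) =====
-- def redraw_table(changes, all_articles):
--     new_table = []
--     incidents_count = max(changes.values()) + 1
--     for i in range(incidents_count):
--         new_table.append([])
--     for key in changes.keys():
--         for article in all_articles:
--             if key == article[0] and changes[key] >=0:
--                 new_table[changes[key]].append(article)
--     new_table = delete_empty_incidents(new_table)
--
--     return new_table
--
-- def delete_empty_incidents(table):
--     new_table = []
--     for incident in table:
--         if (-1, '', '', '') in incident:
--             if len(incident) > 1:
--                 new_incident = []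
--                 for article in incident:
--                     if article != (-1, '', '', ''):
--                         new_incident.append(article)
--                 new_table.append(new_incident)
--         elif incident != []:
--             new_table.append(incident)
--     return new_table
-- ===== SOURCE B (Python) =====
-- def redraw_table(changes, all_articles):
--     # Index articles by their first element once, then extend each bucket per key:
--     # O(|changes| + |articles|) instead of A's O(|changes| * |articles|).
--     by_id = {}
--     for article in all_articles:
--         by_id.setdefault(article[0], []).append(article)
--     buckets = [[] for _ in range(max(changes.values()) + 1)]
--     for key, idx in changes.items():
--         if idx >= 0:
--             buckets[idx] += by_id.get(key, [])
--     result = []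
--     for b in buckets:
--         if (-1, '', '', '') in b:
--             if len(b) > 1:
--                 result.append([a for a in b if a != (-1, '', '', '')])
--         elif b:
--             result.append(b)
--     return result
-- ===== Notes on version B (the rewrite author's own statement) =====
-- stated objective: faster
-- what changed: B builds a dict indexing articles by their first element in one pass and extends each incident bucket with a single lookup per change key, instead of A's rescan of all_articles for every key.
import Mathlib
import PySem

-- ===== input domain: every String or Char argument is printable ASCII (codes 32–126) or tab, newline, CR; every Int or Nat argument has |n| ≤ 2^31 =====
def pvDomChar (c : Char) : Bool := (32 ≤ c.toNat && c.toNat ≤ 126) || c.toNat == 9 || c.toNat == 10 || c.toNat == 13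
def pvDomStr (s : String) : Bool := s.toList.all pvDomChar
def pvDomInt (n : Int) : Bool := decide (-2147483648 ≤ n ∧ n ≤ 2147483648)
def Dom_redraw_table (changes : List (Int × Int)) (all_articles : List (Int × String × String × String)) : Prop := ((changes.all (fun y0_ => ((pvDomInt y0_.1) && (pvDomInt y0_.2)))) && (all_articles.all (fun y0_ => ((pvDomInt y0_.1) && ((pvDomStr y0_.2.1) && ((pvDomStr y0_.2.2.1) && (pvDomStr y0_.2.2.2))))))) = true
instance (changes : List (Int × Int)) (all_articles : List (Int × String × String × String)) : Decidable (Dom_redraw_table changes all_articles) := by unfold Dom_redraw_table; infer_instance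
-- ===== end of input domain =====

-- B replaces A's per-key scan of all_articles by a one-pass dict index of the articles,
-- extending each bucket per key: O(|changes|+|articles|) instead of O(|changes|*|articles|).

-- ===== PORT A =====
def pvSent : Int × String × String × String := (-1, "", "", "")

def delete_empty_incidents (table : List (List (Int × String × String × String))) : List (List (Int × String × String × String)) :=
  table.foldl (fun nt incident =>
    if pvSent ∈ incident then
      if incident.length > 1 then
        nt ++ [incident.foldl (fun ni a => if a ≠ pvSent then ni ++ [a] else ni) []]
      else nt
    else if incident ≠ [] then nt ++ [incident] else nt) []

def redraw_table (changes : List (Int × Int)) (all_articles : List (Int × String × String × String)) : List (List (Int × String × String × String)) :=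
  let d := PySem.Dict.ofList changes
  -- max(changes.values()) raises ValueError on an empty dict; Pre_ excludes that, the getD default is unreachable inside Pre_
  let cnt : Int := (PySem.List.max? (PySem.Dict.values d) (fun x => x)).getD (-1) + 1
  let tbl0 := (PySem.List.pyRange 0 cnt 1).foldl (fun t _ => t ++ [([] : List (Int × String × String × String))]) []
  let tbl := (PySem.Dict.keys d).foldl (fun tbl key =>
    all_articles.foldl (fun tbl article =>
      if key == article.1 && decide (0 ≤ d.getD key 0) then
        tbl.set (d.getD key 0).toNat ((tbl.getD (d.getD key 0).toNat []) ++ [article])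
      else tbl) tbl) tbl0
  delete_empty_incidents tbl

-- ===== PORT B =====
def redraw_table_alt (changes : List (Int × Int)) (all_articles : List (Int × String × String × String)) : List (List (Int × String × String × String)) :=
  let d := PySem.Dict.ofList changes
  let byId := all_articles.foldl (fun m a => m.modify a.1 [] (· ++ [a])) (PySem.Dict.empty : PySem.Dict Int (List (Int × String × String × String)))
  let buckets0 := (PySem.List.pyRange 0 ((PySem.List.max? (PySem.Dict.values d) (fun x => x)).getD (-1) + 1) 1).map
      (fun _ => ([] : List (Int × String × String × String)))
  let buckets := d.items.foldl (fun tbl p =>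
    if decide (0 ≤ p.2) then tbl.set p.2.toNat ((tbl.getD p.2.toNat []) ++ byId.getD p.1 []) else tbl) buckets0
  buckets.foldl (fun res b =>
    if pvSent ∈ b then
      if b.length > 1 then res ++ [b.filter (fun a => a != pvSent)] else res
    else if b ≠ [] then res ++ [b] else res) []

-- ===== PRECONDITION & SPEC =====
-- Pre_ excludes only changes = [] (empty dict), on which A's max(changes.values()) raises ValueError (B's does too).
def Pre_redraw_table (changes : List (Int × Int)) (all_articles : List (Int × String × String × String)) : Prop := changes ≠ []
instance (changes : List (Int × Int)) (all_articles : List (Int × String × String × String)) : Decidable (Pre_redraw_table changes all_articles) := by unfold Pre_redraw_table; infer_instance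
def pvWitness_redraw_table : (List (Int × Int)) × (List (Int × String × String × String)) := ([(1, 0)], [(1, "a", "b", "c")])

def Spec_redraw_table (changes : List (Int × Int)) (all_articles : List (Int × String × String × String)) (out : List (List (Int × String × String × String))) : Prop := out = redraw_table_alt changes all_articles
instance (changes : List (Int × Int)) (all_articles : List (Int × String × String × String)) (out : List (List (Int × String × String × String))) : Decidable (Spec_redraw_table changes all_articles out) := by unfold Spec_redraw_table; infer_instance

-- ===== CLAIM (what is proved, stated in full; the proofs are below) =====
def Claim_equal_redraw_table : Prop := ∀ (changes : List (Int × Int)) (all_articles : List (Int × String × String × String)), Dom_redraw_table changes all_articles → Pre_redraw_table changes all_articles → Spec_redraw_table changes all_articles (redraw_table changes all_articles)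

-- ===== LEMMAS AND PROOFS =====

-- appending matching elements to slot i, one pass = append the filter to slot i
theorem foldl_set_append {α : Type} (p : α → Bool) (i : Nat) :
    ∀ (arts : List α) (tbl : List (List α)),
      arts.foldl (fun tbl a => if p a then tbl.set i ((tbl.getD i []) ++ [a]) else tbl) tbl
        = tbl.set i ((tbl.getD i []) ++ arts.filter p) := by
  intro arts
  induction arts with
  | nil =>
    intro tbl
    by_cases h : i < tbl.length
    · simp [List.getD, List.getElem?_eq_getElem h]
    · simp [List.set_eq_of_length_le (Nat.le_of_not_lt h)]
  | cons a rest ih =>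
    intro tbl
    by_cases h : i < tbl.length
    · simp only [List.foldl_cons, List.filter_cons]
      by_cases hp : p a
      · rw [if_pos hp, if_pos hp, ih]
        rw [show (tbl.set i (tbl.getD i [] ++ [a])).getD i [] = tbl.getD i [] ++ [a] by
          simp [List.getD, h]]
        rw [List.set_set, List.append_assoc]
        rfl
      · rw [if_neg hp, if_neg (by simp [hp]), ih]
    · have hle := Nat.le_of_not_lt h
      simp only [List.foldl_cons]
      by_cases hp : p a
      · rw [if_pos hp, List.set_eq_of_length_le hle, ih,
          List.set_eq_of_length_le hle, List.set_eq_of_length_le hle]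
      · rw [if_neg hp, ih, List.set_eq_of_length_le hle, List.set_eq_of_length_le hle]

-- the grouping dict of B: lookup = the matching articles, in order
theorem getD_group {ν : Type} (k : Int) :
    ∀ (arts : List (Int × ν)) (m : PySem.Dict Int (List (Int × ν))),
      (arts.foldl (fun m a => m.modify a.1 [] (· ++ [a])) m).getD k []
        = m.getD k [] ++ arts.filter (fun a => k == a.1) := by
  intro arts
  induction arts with
  | nil => intro m; simp
  | cons a rest ih =>
    intro m
    simp only [List.foldl_cons, List.filter_cons, ih]
    rw [PySem.Dict.getD_modify]
    by_cases hk : k = a.1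
    · subst hk; simp
    · rw [if_neg hk, if_neg (by simp [hk])]

-- A's cleanup helper equals B's inlined filter-based cleanup, on every table
theorem cleanup_eq (tbl : List (List (Int × String × String × String))) :
    delete_empty_incidents tbl
      = tbl.foldl (fun res b =>
          if pvSent ∈ b then
            if b.length > 1 then res ++ [b.filter (fun a => a != pvSent)] else res
          else if b ≠ [] then res ++ [b] else res) [] := by
  unfold delete_empty_incidents
  refine PySem.List.foldl_congr_mem _ _ _ _ (fun acc b _ => ?_)
  by_cases hm : pvSent ∈ b
  · rw [if_pos hm, if_pos hm]
    by_cases hl : b.length > 1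
    · rw [if_pos hl, if_pos hl,
        PySem.List.foldl_append_ite_eq_filter (p := fun a => a ≠ pvSent)]
      rw [List.nil_append]
      have hf : List.filter (fun x => decide (x ≠ pvSent)) b = List.filter (fun a => a != pvSent) b := by
        apply List.filter_congr
        intro a _
        by_cases h : a = pvSent <;> simp [h, bne_iff_ne]
      rw [hf]
    · rw [if_neg hl, if_neg hl]
  · rw [if_neg hm, if_neg hm]

theorem redraw_table_eq (changes : List (Int × Int)) (all_articles : List (Int × String × String × String)) :
    redraw_table changes all_articles = redraw_table_alt changes all_articles := by
  unfold redraw_table redraw_table_alt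
  simp only []
  rw [cleanup_eq]
  congr 1
  -- the initial empty-bucket tables coincide
  rw [PySem.List.foldl_append_singleton_eq_map
      (f := fun _ => ([] : List (Int × String × String × String)))]
  rw [List.nil_append]
  -- both fills traverse the dict's items
  rw [show PySem.Dict.keys (PySem.Dict.ofList changes)
        = (PySem.Dict.ofList changes).items.map Prod.fst from rfl,
      List.foldl_map]
  refine PySem.List.foldl_congr_mem _ _ _ _ (fun tbl p hp => ?_)
  have hval : (PySem.Dict.ofList changes).getD p.1 0 = p.2 :=
    PySem.Dict.getD_of_mem_items _ (by simpa using hp) (PySem.Dict.nodup_keys_ofList changes) 0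
  rw [hval]
  by_cases hv : (0 : Int) ≤ p.2
  · rw [if_pos (by simpa using hv)]
    rw [PySem.List.foldl_congr_mem _ _
        (fun tbl a => if (fun a => p.1 == a.1) a then tbl.set p.2.toNat ((tbl.getD p.2.toNat []) ++ [a]) else tbl)
        _ (fun tbl a _ => by simp [hv])]
    beta_reduce
    rw [foldl_set_append (p := fun a : Int × String × String × String => p.1 == a.1)]
    rw [getD_group]
    simp
  · rw [if_neg (by simpa using hv)]
    rw [PySem.List.foldl_congr_mem _ _ (fun tbl _ => tbl) _ (fun tbl a _ => by simp [hv]),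
        PySem.List.foldl_ignore]

-- ===== VERDICT (by name: the statement is the Claim_ definition above) =====
theorem redraw_table_spec : Claim_equal_redraw_table := by
  intro changes all_articles _ _
  unfold Spec_redraw_table
  exact redraw_table_eq changes all_articles
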